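-- pv_equiv track=rewrite | github.com/akhilmw/DSA | BasicDSA/Maps_Sets/makeUniqueArray.py | minElementsToRemove2
-- ===== SOURCE A (Python) =====
-- def minElementsToRemove2(arr):
--     count = 0
--     myDict = {}
--     for i in range(len(arr)):
--         value = myDict.get(arr[i], 0)
--         if value > 0:
--             count += 1
--         else:
--             myDict[arr[i]] = 1
--     return count
-- ===== SOURCE B (Python) =====
-- def minElementsToRemove2(arr):
--     s = sorted(arr)
--     count = 0
--     for prev, cur in zip(s, s[1:]):
--         if prev == cur:
--             count += 1
--     return count
-- ===== Notes on version B (the rewrite author's own statement) =====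
-- stated objective: alternative
-- what changed: Replaced the hash-dict membership loop by sort-then-scan: sort the list and count adjacent equal pairs, with no dictionary or membership test at all.
import Mathlib
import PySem

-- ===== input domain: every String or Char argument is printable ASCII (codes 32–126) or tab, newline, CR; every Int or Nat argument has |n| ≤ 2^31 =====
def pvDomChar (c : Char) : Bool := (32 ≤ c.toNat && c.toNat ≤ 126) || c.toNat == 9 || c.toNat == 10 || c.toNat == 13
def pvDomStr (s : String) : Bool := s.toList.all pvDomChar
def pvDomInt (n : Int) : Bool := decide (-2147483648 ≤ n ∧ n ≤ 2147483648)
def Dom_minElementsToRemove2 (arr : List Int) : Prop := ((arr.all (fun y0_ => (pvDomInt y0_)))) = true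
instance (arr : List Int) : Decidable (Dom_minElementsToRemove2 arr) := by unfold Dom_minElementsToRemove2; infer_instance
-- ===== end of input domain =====

-- B replaces A's one-pass hash-dict membership loop by sort-then-scan: sort the
-- list and count adjacent equal pairs (objective: alternative; no speed claim).

-- ===== PORT A =====
-- count = 0; myDict = {}; for i in range(len(arr)): value = myDict.get(arr[i], 0);
-- if value > 0: count += 1 else: myDict[arr[i]] = 1; return count
def minElementsToRemove2 (arr : List Int) : Int :=
  (((PySem.List.pyRange 0 (arr.length : Int) 1).foldl
      (fun (st : Int × PySem.Dict Int Int) i =>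
        if st.2.getD (PySem.List.pyGetD arr i 0) 0 > 0 then (st.1 + 1, st.2)
        else (st.1, st.2.insert (PySem.List.pyGetD arr i 0) 1))
      (0, PySem.Dict.empty)).1)

-- ===== PORT B =====
-- s = sorted(arr); count = 0; for prev, cur in zip(s, s[1:]):
--   if prev == cur: count += 1; return count
def minElementsToRemove2_alt (arr : List Int) : Int :=
  let s := PySem.List.sorted arr (fun x => x) false
  (s.zip (PySem.List.slice s (some (1 : Int)) none)).foldl
    (fun (count : Int) p => if p.1 == p.2 then count + 1 else count) 0

-- ===== PRECONDITION & SPEC =====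
def Spec_minElementsToRemove2 (arr : List Int) (out : Int) : Prop := out = minElementsToRemove2_alt arr
instance (arr : List Int) (out : Int) : Decidable (Spec_minElementsToRemove2 arr out) := by unfold Spec_minElementsToRemove2; infer_instance

-- ===== CLAIM (what is proved, stated in full; the proofs are below) =====
def Claim_equal_minElementsToRemove2 : Prop := ∀ (arr : List Int), Dom_minElementsToRemove2 arr → Spec_minElementsToRemove2 arr (minElementsToRemove2 arr)

-- ===== LEMMAS AND PROOFS =====

-- A's loop invariant: provided every stored value is positive exactly on contained keys,
-- the final counter equals count + |l| - (|update keys l| - |keys|).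
theorem pv_loop_inv (l : List Int) (count : Int) (d : PySem.Dict Int Int)
    (H : ∀ y, d.getD y 0 > 0 ↔ d.contains y = true) :
    ((l.foldl
      (fun (st : Int × PySem.Dict Int Int) x =>
        if st.2.getD x 0 > 0 then (st.1 + 1, st.2)
        else (st.1, st.2.insert x 1))
      (count, d)).1)
    = count + (l.length : Int)
        - (((PySem.Set.update d.keys l).length : Int) - (d.keys.length : Int)) := by
  induction l generalizing count d with
  | nil => simp [PySem.Set.update]
  | cons x rest ih =>
    by_cases hc : d.contains x = true
    · have hv : d.getD x 0 > 0 := (H x).mpr hc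
      have hadd : PySem.Set.add d.keys x = d.keys := by
        simp [PySem.Set.add, PySem.Set.contains,
          (PySem.Dict.contains_iff_mem_keys d x).mp hc]
      simp only [List.foldl_cons, if_pos hv]
      rw [ih (count + 1) d H]
      simp [PySem.Set.update, hadd] at *
      ring
    · have hv : ¬ d.getD x 0 > 0 := fun h => hc ((H x).mp h)
      simp only [List.foldl_cons, if_neg hv]
      have H' : ∀ y, (d.insert x 1).getD y 0 > 0 ↔ (d.insert x 1).contains y = true := by
        intro y
        rw [PySem.Dict.getD_insert, PySem.Dict.contains_insert]
        by_cases hy : y = x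
        · simp [hy]
        · simp [hy, H y, beq_iff_eq]
      rw [ih count (d.insert x 1) H']
      have hx : x ∉ d.keys := fun hm => hc ((PySem.Dict.contains_iff_mem_keys d x).mpr hm)
      have hk : (d.insert x 1).keys = d.keys ++ [x] := by
        apply PySem.Dict.keys_insert_of_not_contains
        simp [Bool.not_eq_true] at hc; exact hc
      have hadd : PySem.Set.add d.keys x = d.keys ++ [x] := by
        simp [PySem.Set.add, PySem.Set.contains, hx]
      simp only [PySem.Set.update, List.foldl_cons, hk, hadd, List.length_append,
        List.length_cons, List.length_nil, List.length_cons]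
      push_cast
      ring

-- |set(l)| = card of l's element finset
theorem pv_setLen_eq_card (l : List Int) :
    ((PySem.Set.ofList l).length : Int) = (l.toFinset.card : Int) := by
  have hn : (PySem.Set.ofList l).Nodup := PySem.Set.nodup_ofList l
  have ht : (PySem.Set.ofList l).toFinset = l.toFinset := by
    ext x; simp [List.mem_toFinset, PySem.Set.mem_ofList]
  have := List.toFinset_card_of_nodup hn
  rw [← ht, this]

-- B's scan invariant on a sorted list: adjacent-equal pairs count |s| - |s.toFinset|.
theorem pv_adj_count (s : List Int) (hs : s.Pairwise (· ≤ ·)) (c : Int) :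
    ((s.zip (s.drop 1)).foldl
      (fun (count : Int) p => if p.1 == p.2 then count + 1 else count) c)
    = c + (s.length : Int) - (s.toFinset.card : Int) := by
  induction s generalizing c with
  | nil => simp
  | cons x t ih =>
    cases t with
    | nil => simp
    | cons y r =>
      have hxy : x ≤ y := (List.pairwise_cons.mp hs).1 y (by simp)
      have hall : ∀ z ∈ y :: r, x ≤ z := (List.pairwise_cons.mp hs).1
      have hs' : (y :: r).Pairwise (· ≤ ·) := (List.pairwise_cons.mp hs).2
      simp only [List.drop_succ_cons, List.drop_zero] at ih
      simp only [List.drop_succ_cons, List.drop_zero, List.zip_cons_cons, List.foldl_cons]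
      by_cases hxe : x = y
      · have hmem : x ∈ (y :: r).toFinset := by simp [hxe]
        rw [if_pos (by simp [hxe])]
        rw [ih hs' (c + 1)]
        have : (x :: y :: r).toFinset = (y :: r).toFinset := by
          simp only [List.toFinset_cons]
          exact Finset.insert_eq_self.mpr (by simpa using hmem)
        rw [this]
        simp; ring
      · have hnm : x ∉ (y :: r).toFinset := by
          simp only [List.mem_toFinset]
          intro hm
          have hle2 : ∀ z ∈ y :: r, y ≤ z := by
            intro z hz
            simp only [List.mem_cons] at hz
            rcases hz with rfl | hz
            · exact le_refl _
            · exact (List.pairwise_cons.mp hs').1 z hz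
          have : y ≤ x := hle2 x hm
          exact hxe (le_antisymm hxy this)
        rw [if_neg (by simp [hxe])]
        rw [ih hs' c]
        have : (x :: y :: r).toFinset.card = (y :: r).toFinset.card + 1 := by
          simp only [List.toFinset_cons]
          exact Finset.card_insert_of_notMem (by simpa using hnm)
        rw [this]
        simp; ring

-- ===== VERDICT (by name: the statement is the Claim_ definition above) =====
theorem minElementsToRemove2_spec : Claim_equal_minElementsToRemove2 := by
  intro arr _
  unfold Spec_minElementsToRemove2 minElementsToRemove2 minElementsToRemove2_alt
  -- A's side: the loop counts |arr| - |set(arr)|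
  rw [PySem.List.foldl_pyRange_pyGetD' (a := 0) (xs := arr) (d := 0)
      (f := fun (st : Int × PySem.Dict Int Int) x =>
        if st.2.getD x 0 > 0 then (st.1 + 1, st.2)
        else (st.1, st.2.insert x 1)) (init := ((0 : Int), PySem.Dict.empty)) (by norm_num)]
  simp only [Int.toNat_zero, List.drop_zero]
  rw [pv_loop_inv arr 0 PySem.Dict.empty
      (by intro y; simp [PySem.Dict.getD_empty, PySem.Dict.contains_empty])]
  have hupd : PySem.Set.update (PySem.Dict.empty (κ := Int) (ν := Int)).keys arr
      = PySem.Set.ofList arr := by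
    simp [PySem.Set.update, PySem.Set.ofList, PySem.Dict.empty, PySem.Dict.keys]
  rw [hupd]
  -- B's side: sort then count adjacent equal pairs
  have hslice : PySem.List.slice (PySem.List.sorted arr (fun x => x) false)
      (some ((1 : Nat) : Int)) none
      = (PySem.List.sorted arr (fun x => x) false).drop 1 :=
    PySem.List.slice_from_natCast _ 1
  simp only [Nat.cast_one] at hslice
  rw [hslice,
    pv_adj_count (PySem.List.sorted arr (fun x => x) false)
      (by simpa using PySem.List.sorted_pairwise arr (fun x => x)) 0]
  have hperm : (PySem.List.sorted arr (fun x => x) false).Perm arr :=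
    PySem.List.sorted_perm arr (fun x => x) false
  rw [hperm.length_eq, List.toFinset_eq_of_perm _ _ hperm, ← pv_setLen_eq_card]
  simp [PySem.Dict.empty, PySem.Dict.keys]
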